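-- pv_equiv track=rewrite | github.com/wb-08/PokerVision | scripts/table_recognition.py | assign_positions
-- ===== SOURCE A (Python) =====
-- def assign_positions(players_info):
--     """
--     assign each player one of six positions if the player in the game
--     Parameters:
--         players_info(dict): info about players in {1:'', 2: 'dealer_button',3:'-so-' etc. } format
--     Returns:
--         players_info(dict): info about players in {1: 'BB', 2: 'SB', 3: '-so-' etc. } format
--     """
--     busy_seats = [k for k, v in players_info.items() if v != '-' and v != '-so-']
--     exist_positions = ['BTN', 'SB', 'BB', 'UTG', 'MP', 'CO']
--     del exist_positions[3:3+(6-len(busy_seats))]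
--     player_with_button = [k for k, v in players_info.items() if v == 'dealer_button'][0]
--     for index, player_number in enumerate(
--             busy_seats[busy_seats.index(player_with_button):] + busy_seats[:busy_seats.index(player_with_button)]):
--         if len(busy_seats) == 2:
--             position = 'SB' if index == 0 else 'BB'
--             players_info[player_number] = position
--         else:
--             players_info[player_number] = exist_positions[index]
--     return players_info
-- ===== SOURCE B (Python) =====
-- def _label(off, n):
--     if n == 2:
--         return 'SB' if off == 0 else 'BB'
--     if off < 3:
--         return ('BTN', 'SB', 'BB')[off]
--     return ('UTG', 'MP', 'CO')[off + 3 - n]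
--
--
-- def assign_positions(players_info):
--     n = 0
--     b = None
--     for v in players_info.values():
--         if v != '-' and v != '-so-':
--             if v == 'dealer_button' and b is None:
--                 b = n
--             n += 1
--     out = {}
--     i = 0
--     for k, v in players_info.items():
--         if v != '-' and v != '-so-':
--             off = i - b
--             out[k] = _label(off + n if off < 0 else off, n)
--             i += 1
--         else:
--             out[k] = v
--     return out
-- ===== Notes on version B (the rewrite author's own statement) =====
-- stated objective: alternative
-- what changed: B drops A's label-list construction (del-slice trimming) and rotated slice-concatenation entirely: one counting pass finds the busy count n and the button's busy-rank b, then a second pass over the dict in original order builds a NEW dict, computing each busy seat's label with a closed-form function of (rank - b mod n, n) over three fixed tuples instead of indexing a trimmed list.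
import Mathlib
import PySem

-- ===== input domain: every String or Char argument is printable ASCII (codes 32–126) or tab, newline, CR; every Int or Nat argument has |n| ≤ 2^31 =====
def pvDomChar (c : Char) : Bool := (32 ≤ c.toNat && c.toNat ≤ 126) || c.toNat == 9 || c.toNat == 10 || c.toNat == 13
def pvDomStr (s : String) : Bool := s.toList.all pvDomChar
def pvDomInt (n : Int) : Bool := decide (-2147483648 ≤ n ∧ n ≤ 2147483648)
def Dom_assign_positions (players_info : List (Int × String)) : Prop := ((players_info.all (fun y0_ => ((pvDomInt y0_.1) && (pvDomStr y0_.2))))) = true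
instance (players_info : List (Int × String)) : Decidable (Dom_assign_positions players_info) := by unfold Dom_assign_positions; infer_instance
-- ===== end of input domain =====

-- B replaces A's trimmed label list and rotated slice-concatenation by two counting passes and a
-- closed-form label function of (busy rank relative to the button, busy count); equal cost.
-- Python A mutates its dict argument in place and returns it, while B builds and returns a NEW dict;
-- the equivalence proved here is about the returned dict only.

-- ===== PORT A =====
-- A-side helper: the 'del exist_positions[3:3+(6-n)]' line of A (clamped slice deletion).
def exposOf (n : Nat) : List String :=
  let exist0 : List String := ["BTN", "SB", "BB", "UTG", "MP", "CO"]
  let stop : Int := 3 + (6 - (n : Int))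
  let stopC : Nat := (if stop < 0 then max (6 + stop) 0 else min stop 6).toNat
  exist0.take 3 ++ exist0.drop (max 3 stopC)

-- Transliteration of A.  Python's raise sites — the '[0]' (IndexError) when no seat holds
-- 'dealer_button', and 'exist_positions[index]' (IndexError) when more than 6 seats are busy —
-- return junk ([] / "") here; Pre_assign_positions excludes exactly those inputs.
def assign_positions (players_info : List (Int × String)) : List (Int × String) :=
  let d := PySem.Dict.ofList players_info
  let busy_seats := (d.items.filter (fun p => p.2 != "-" && p.2 != "-so-")).map (fun p => p.1)
  let exist_positions := exposOf busy_seats.length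
  match PySem.List.pyGet? ((d.items.filter (fun p => p.2 == "dealer_button")).map (fun p => p.1)) 0 with
  | none => []
  | some pwb =>
    let bi := (PySem.List.index? busy_seats pwb).getD 0
    let rotated := PySem.List.slice busy_seats (some (bi : Int)) none ++
                   PySem.List.slice busy_seats none (some (bi : Int))
    ((PySem.List.enumerate rotated).foldl (fun (d2 : PySem.Dict Int String) (p : Int × Int) =>
        if busy_seats.length == 2 then
          d2.insert p.2 (if p.1 == 0 then "SB" else "BB")
        else
          d2.insert p.2 ((PySem.List.pyGet? exist_positions p.1).getD "")) d).items

-- ===== PORT B =====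
-- B-side helper: the closed-form label function _label(off, n) of Source B (tuple indexing via pyGet?;
-- an out-of-range index is Python's IndexError, excluded by Pre_assign_positions).
def labelOf (off n : Int) : String :=
  if n == 2 then (if off == 0 then "SB" else "BB")
  else if off < 3 then (PySem.List.pyGet? ["BTN", "SB", "BB"] off).getD ""
  else (PySem.List.pyGet? ["UTG", "MP", "CO"] (off + 3 - n)).getD ""

-- Transliteration of B (Source B): pass 1 folds (n, b) over the values (b : Option Int is Python's
-- 'b = None' sentinel), pass 2 folds the new output dict together with the running busy counter i
-- over the items.  When b is still None at a busy seat, Python's 'i - b' raises TypeError: with a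
-- busy seat the port returns junk [] there, without one the second loop only copies (both outside
-- Pre_assign_positions' button requirement or exactly the copying Python B performs).
def assign_positions_alt (players_info : List (Int × String)) : List (Int × String) :=
  let d := PySem.Dict.ofList players_info
  let st := d.values.foldl (fun (st : Int × Option Int) v =>
      if v != "-" && v != "-so-" then
        (st.1 + 1, if v == "dealer_button" && st.2.isNone then some st.1 else st.2)
      else st) (0, none)
  match st.2 with
  | none =>
    if st.1 == 0 then
      (d.items.foldl (fun (acc : PySem.Dict Int String × Int) kv =>
        (acc.1.insert kv.1 kv.2, acc.2)) (PySem.Dict.empty, 0)).1.items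
    else []
  | some b =>
    (d.items.foldl (fun (acc : PySem.Dict Int String × Int) kv =>
      if kv.2 != "-" && kv.2 != "-so-" then
        (acc.1.insert kv.1
          (labelOf (if acc.2 - b < 0 then acc.2 - b + st.1 else acc.2 - b) st.1),
         acc.2 + 1)
      else (acc.1.insert kv.1 kv.2, acc.2)) (PySem.Dict.empty, 0)).1.items

-- ===== PRECONDITION & SPEC =====
-- Pre_ excludes exactly the inputs on which Python A raises IndexError: dicts whose values
-- contain no 'dealer_button', and dicts with more than 6 busy (non '-'/'-so-') seats.
def Pre_assign_positions (players_info : List (Int × String)) : Prop :=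
  (∃ p ∈ (PySem.Dict.ofList players_info).items, p.2 = "dealer_button") ∧
  ((PySem.Dict.ofList players_info).items.filter
      (fun p => p.2 != "-" && p.2 != "-so-")).length ≤ 6
instance (players_info : List (Int × String)) : Decidable (Pre_assign_positions players_info) := by
  unfold Pre_assign_positions; infer_instance

def pvWitness_assign_positions : (List (Int × String)) :=
  [(1, "dealer_button"), (2, "x"), (3, "-"), (4, "-so-"), (5, "y")]

def Spec_assign_positions (players_info : List (Int × String)) (out : List (Int × String)) : Prop := out = assign_positions_alt players_info
instance (players_info : List (Int × String)) (out : List (Int × String)) : Decidable (Spec_assign_positions players_info out) := by unfold Spec_assign_positions; infer_instance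

-- ===== CLAIM (what is proved, stated in full; the proofs are below) =====
def Claim_equal_assign_positions : Prop := ∀ (players_info : List (Int × String)), Dom_assign_positions players_info → Pre_assign_positions players_info → Spec_assign_positions players_info (assign_positions players_info)

-- ===== LEMMAS AND PROOFS =====

-- the busy predicate shared by the helper lemmas (definitionally the ports' literal lambda)
def pvBusy (p : Int × String) : Bool := p.2 != "-" && p.2 != "-so-"

-- the normal form both ports are reduced to: walk the items once, labelling the c-th busy item h c
def pvMapRank (h : Nat → String) : Nat → List (Int × String) → List (Int × String)
  | _, [] => []
  | c, q :: r => if pvBusy q then (q.1, h c) :: pvMapRank h (c + 1) r else q :: pvMapRank h c r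

-- L1 (A side): folding ordinary inserts of distinct existing keys maps the items pointwise
theorem pv_items_foldl_insert (ps : List (Int × String)) (d : PySem.Dict Int String)
    (hnd : (ps.map (fun p => p.1)).Nodup) (hsub : ∀ p ∈ ps, d.contains p.1 = true) :
    (ps.foldl (fun d2 p => d2.insert p.1 p.2) d).items
      = d.items.map (fun q => ((ps.find? (fun p => p.1 == q.1)).getD q)) := by
  induction ps generalizing d with
  | nil => simp [List.find?_nil]
  | cons p ps ih =>
    simp only [List.map_cons, List.nodup_cons] at hnd
    have hc : d.contains p.1 = true := hsub p (by simp)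
    have hsub' : ∀ r ∈ ps, (d.insert p.1 p.2).contains r.1 = true := by
      intro r hr
      rw [PySem.Dict.contains_insert]
      simp [hsub r (List.mem_cons_of_mem _ hr)]
    rw [List.foldl_cons, ih _ hnd.2 hsub',
        PySem.Dict.items_insert_of_contains _ _ hc, List.map_map]
    apply List.map_congr_left
    intro q hq
    by_cases h : q.1 = p.1
    · have hfind : ps.find? (fun r => r.1 == p.1) = none := by
        apply List.find?_eq_none.mpr
        intro r hr he
        exact hnd.1 (eq_of_beq he ▸ List.mem_map_of_mem hr)
      simp [Function.comp, h, hfind]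
    · have h' : (q.1 == p.1) = false := by simp [h]
      have h'' : (p.1 == q.1) = false := by simp [Ne.symm h]
      simp [Function.comp, h', h'']

-- L2 (A side): find? by key over the (key, value-of-index) pairs of an enumeration
theorem pv_find?_enum_pairs (g : Int → String) (k : Int) :
    ∀ (l : List Int) (s : Int),
    (((PySem.List.enumerate l s).map (fun p => (p.2, g p.1))).find? (fun r => r.1 == k))
      = if k ∈ l then some (k, g (s + (l.idxOf k : Int))) else none := by
  intro l
  induction l with
  | nil => intro s; simp [PySem.List.enumerate_nil]
  | cons a l ih =>
    intro s
    rw [PySem.List.enumerate_cons]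
    simp only [List.map_cons, List.find?_cons]
    by_cases h : a = k
    · subst h
      simp [List.idxOf_cons_self]
    · have h' : (a == k) = false := by simp [h]
      rw [h']
      rw [ih (s + 1)]
      by_cases hm : k ∈ l
      · have : List.idxOf k (a :: l) = List.idxOf k l + 1 := by
          simp [h]
        simp only [List.mem_cons, hm, or_true, if_pos, this]
        have : s + 1 + (List.idxOf k l : Int) = s + ((List.idxOf k l + 1 : Nat) : Int) := by
          push_cast; ring
        rw [this]
      · have : ¬ (k ∈ a :: l) := by simp [hm, Ne.symm h]
        simp [hm, this]

-- L3 (A side): a loop over enumerate l inserting l[i] ↦ g i rewrites each existing busy item in place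
theorem pv_items_fold_enum (g : Int → String) (l : List Int) (d : PySem.Dict Int String)
    (hnd : l.Nodup) (hsub : ∀ k ∈ l, d.contains k = true) :
    ((PySem.List.enumerate l).foldl (fun d2 p => d2.insert p.2 (g p.1)) d).items
      = d.items.map (fun q => if q.1 ∈ l then (q.1, g (l.idxOf q.1 : Int)) else q) := by
  have hfold : (PySem.List.enumerate l).foldl (fun d2 p => d2.insert p.2 (g p.1)) d
      = ((PySem.List.enumerate l).map (fun p => (p.2, g p.1))).foldl
          (fun d2 r => d2.insert r.1 r.2) d := by
    rw [List.foldl_map]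
  have hkeys : ((PySem.List.enumerate l).map (fun p => (p.2, g p.1))).map (fun p => p.1) = l := by
    rw [List.map_map]
    exact PySem.List.map_snd_enumerate l 0
  rw [hfold, pv_items_foldl_insert]
  · apply List.map_congr_left
    intro q _
    rw [pv_find?_enum_pairs]
    split
    · simp
    · simp
  · rw [hkeys]; exact hnd
  · intro r hr
    obtain ⟨p, hp, rfl⟩ := List.mem_map.mp hr
    obtain ⟨kk, hkk, rfl⟩ := (PySem.List.mem_enumerate_iff l 0 p).mp hp
    exact hsub _ (List.getElem_mem hkk)

-- L4 (B side, pass 1): a value list without 'dealer_button' only counts, from b = none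
theorem pv_pass1_nb (L : List String) (hb : ∀ v ∈ L, v ≠ "dealer_button") (n0 : Int) :
    L.foldl (fun (st : Int × Option Int) v =>
        if v != "-" && v != "-so-" then
          (st.1 + 1, if v == "dealer_button" && st.2.isNone then some st.1 else st.2)
        else st) (n0, none)
      = (n0 + ((L.countP (fun v => v != "-" && v != "-so-") : Nat) : Int), none) := by
  induction L generalizing n0 with
  | nil => simp
  | cons v L ih =>
    have hv : (v == "dealer_button") = false := by
      simpa using hb v (by simp)
    rw [List.foldl_cons]
    by_cases hbz : (v != "-" && v != "-so-") = true
    · rw [if_pos hbz, hv]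
      simp only [Bool.false_and, if_neg (Bool.false_ne_true)]
      rw [ih (fun w hw => hb w (List.mem_cons_of_mem _ hw))]
      simp only [List.countP_cons, if_pos hbz, Prod.mk.injEq, and_true]
      push_cast; ring
    · rw [if_neg hbz, ih (fun w hw => hb w (List.mem_cons_of_mem _ hw))]
      simp [hbz]
-- L5 (B side, pass 1): once b = some c0, only the count changes
theorem pv_pass1_seen (L : List String) (n0 c0 : Int) :
    L.foldl (fun (st : Int × Option Int) v =>
        if v != "-" && v != "-so-" then
          (st.1 + 1, if v == "dealer_button" && st.2.isNone then some st.1 else st.2)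
        else st) (n0, some c0)
      = (n0 + ((L.countP (fun v => v != "-" && v != "-so-") : Nat) : Int), some c0) := by
  induction L generalizing n0 with
  | nil => simp
  | cons v L ih =>
    rw [List.foldl_cons]
    by_cases hbz : (v != "-" && v != "-so-") = true
    · rw [if_pos hbz]
      simp only [Option.isNone_some, Bool.and_false,
        if_neg (Bool.false_ne_true)]
      rw [ih]
      simp only [List.countP_cons, if_pos hbz, Prod.mk.injEq, and_true]
      push_cast; ring
    · rw [if_neg hbz, ih]
      simp [hbz]

-- L5b (B side, pass 1): the first 'dealer_button' records the busy count as the button rank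
theorem pv_pass1_btn (L : List String) (n0 : Int) :
    ("dealer_button" :: L).foldl (fun (st : Int × Option Int) v =>
        if v != "-" && v != "-so-" then
          (st.1 + 1, if v == "dealer_button" && st.2.isNone then some st.1 else st.2)
        else st) (n0, none)
      = (n0 + 1 + ((L.countP (fun v => v != "-" && v != "-so-") : Nat) : Int), some n0) := by
  have h1 : ("dealer_button" :: L).foldl (fun (st : Int × Option Int) v =>
        if v != "-" && v != "-so-" then
          (st.1 + 1, if v == "dealer_button" && st.2.isNone then some st.1 else st.2)
        else st) (n0, none)
      = L.foldl (fun (st : Int × Option Int) v =>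
        if v != "-" && v != "-so-" then
          (st.1 + 1, if v == "dealer_button" && st.2.isNone then some st.1 else st.2)
        else st) (n0 + 1, some n0) := rfl
  rw [h1, pv_pass1_seen]

-- L6 (B side, pass 2): the output fold over fresh distinct keys appends one labelled item per seat
theorem pv_pass2 (f : Int → String) :
    ∀ (L : List (Int × String)) (acc : PySem.Dict Int String) (c : Nat),
    (∀ q ∈ L, acc.contains q.1 = false) → (L.map (fun p => p.1)).Nodup →
    (L.foldl (fun (a : PySem.Dict Int String × Int) kv =>
        if pvBusy kv then (a.1.insert kv.1 (f a.2), a.2 + 1)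
        else (a.1.insert kv.1 kv.2, a.2)) (acc, (c : Int))).1.items
      = acc.items ++ pvMapRank (fun j => f ((j : Nat) : Int)) c L := by
  intro L
  induction L with
  | nil => intro acc c _ _; simp [pvMapRank]
  | cons q L ih =>
    intro acc c hfresh hnd
    simp only [List.map_cons, List.nodup_cons] at hnd
    have hq : acc.contains q.1 = false := hfresh q (by simp)
    have hfresh' : ∀ v, ∀ r ∈ L, (acc.insert q.1 v).contains r.1 = false := by
      intro v r hr
      rw [PySem.Dict.contains_insert]
      have : (r.1 == q.1) = false := by
        simp only [beq_eq_false_iff_ne]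
        intro he
        exact hnd.1 (he ▸ List.mem_map_of_mem hr)
      rw [this, hfresh r (List.mem_cons_of_mem _ hr)]
      rfl
    rw [List.foldl_cons]
    cases hqb : pvBusy q with
    | true =>
      dsimp only
      rw [if_pos rfl,
          show (c : Int) + 1 = ((c + 1 : Nat) : Int) by push_cast; ring,
          ih _ _ (hfresh' _) hnd.2,
          PySem.Dict.items_insert_of_not_contains _ _ hq]
      simp [pvMapRank, hqb]
    | false =>
      dsimp only
      rw [if_neg (by decide : ¬ (false = true)),
          ih _ _ (hfresh' _) hnd.2,
          PySem.Dict.items_insert_of_not_contains _ _ hq]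
      simp [pvMapRank, hqb]

-- L7: pvMapRank only looks at ranks below c + (number of busy items)
theorem pv_mapRank_congr (h1 h2 : Nat → String) :
    ∀ (L : List (Int × String)) (c : Nat),
    (∀ j, c ≤ j → j < c + L.countP pvBusy → h1 j = h2 j) →
    pvMapRank h1 c L = pvMapRank h2 c L := by
  intro L
  induction L with
  | nil => intro c _; rfl
  | cons q L ih =>
    intro c hj
    cases hqb : pvBusy q with
    | true =>
      simp only [pvMapRank, hqb, if_pos]
      rw [hj c le_rfl (by rw [List.countP_cons, if_pos hqb]; omega),
          ih (c + 1) (fun j hj1 hj2 => hj j (by omega)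
            (by rw [List.countP_cons, if_pos hqb]; omega))]
    | false =>
      simp only [pvMapRank, hqb, Bool.false_eq_true, if_neg, not_false_iff]
      rw [ih c (fun j hj1 hj2 => hj j hj1
        (by rw [List.countP_cons, if_neg (by simp [hqb])]; omega))]

-- L8: an 'if member then label by idxOf in the busy-key list' map IS pvMapRank
theorem pv_map_eq_mapRank (h : Nat → String) (full : List (Int × String))
    (hnd : (full.map (fun p => p.1)).Nodup) :
    ∀ (rest pref : List (Int × String)), full = pref ++ rest →
    rest.map (fun q => if q.1 ∈ ((full.filter pvBusy).map (fun p => p.1))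
        then (q.1, h (((full.filter pvBusy).map (fun p => p.1)).idxOf q.1)) else q)
      = pvMapRank h (pref.filter pvBusy).length rest := by
  intro rest
  induction rest with
  | nil => intro pref _; rfl
  | cons q rest ih =>
    intro pref hfull
    have hqfull : q ∈ full := by rw [hfull]; simp
    have hkeys : (full.map (fun p => p.1)).Nodup := hnd
    have hfull' : full = (pref ++ [q]) ++ rest := by rw [hfull]; simp
    have hnotpre : q.1 ∉ pref.map (fun p => p.1) := by
      have h2 : (pref.map (fun p => p.1) ++ (q :: rest).map (fun p => p.1)).Nodup := by
        rw [← List.map_append, ← hfull]; exact hnd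
      intro hmem
      exact (List.disjoint_of_nodup_append h2) hmem (by simp)
    cases hqb : pvBusy q with
    | true =>
      have hbk : (full.filter pvBusy).map (fun p => p.1)
          = (pref.filter pvBusy).map (fun p => p.1)
            ++ q.1 :: (rest.filter pvBusy).map (fun p => p.1) := by
        rw [hfull, List.filter_append, List.filter_cons, if_pos hqb]
        simp
      have hnotpreb : q.1 ∉ (pref.filter pvBusy).map (fun p => p.1) := by
        intro hmem
        obtain ⟨r, hr, hr1⟩ := List.mem_map.mp hmem
        exact hnotpre (hr1 ▸ List.mem_map_of_mem (List.mem_of_mem_filter hr))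
      have hmem : q.1 ∈ (full.filter pvBusy).map (fun p => p.1) := by
        rw [hbk]; simp
      have hidx : ((full.filter pvBusy).map (fun p => p.1)).idxOf q.1
          = (pref.filter pvBusy).length := by
        rw [hbk, List.idxOf_append_of_notMem hnotpreb]
        simp
      rw [List.map_cons, if_pos hmem, hidx, ih (pref ++ [q]) hfull']
      have hlen : ((pref ++ [q]).filter pvBusy).length = (pref.filter pvBusy).length + 1 := by
        rw [List.filter_append, List.filter_cons, if_pos hqb]
        simp
      rw [hlen]
      simp [pvMapRank, hqb]
    | false =>
      have hnotmem : q.1 ∉ (full.filter pvBusy).map (fun p => p.1) := by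
        intro hmem
        obtain ⟨r, hr, hr1⟩ := List.mem_map.mp hmem
        have hrf : r ∈ full := List.mem_of_mem_filter hr
        have hrb : pvBusy r = true := List.of_mem_filter hr
        have : r = q := List.inj_on_of_nodup_map hkeys hrf hqfull hr1
        rw [this, hqb] at hrb
        exact Bool.false_ne_true hrb
      rw [List.map_cons, if_neg hnotmem, ih (pref ++ [q]) hfull']
      have hlen : ((pref ++ [q]).filter pvBusy).length = (pref.filter pvBusy).length := by
        rw [List.filter_append, List.filter_cons, if_neg (by simp [hqb])]
        simp
      rw [hlen]
      simp [pvMapRank, hqb]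

-- L9: pointwise value equality between A's trimmed-list lookup and B's closed-form label
theorem pv_value_eq (n j : Nat) (h1 : 1 ≤ n) (h6 : n ≤ 6) (hj : j < n) :
    (if n == 2 then (if (j : Int) == 0 then "SB" else "BB")
     else ((PySem.List.pyGet? (exposOf n) (j : Int)).getD ""))
    = labelOf (j : Int) (n : Int) := by
  interval_cases n <;> interval_cases j <;> decide

theorem assign_positions_spec : Claim_equal_assign_positions := by
  intro pi hdom hpre
  show assign_positions pi = assign_positions_alt pi
  obtain ⟨hdeal, hlen⟩ := hpre
  simp only [assign_positions]
  set d := PySem.Dict.ofList pi with hd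
  rw [show (fun p : Int × String => p.2 != "-" && p.2 != "-so-") = pvBusy from rfl]
  have hkeys : d.keys.Nodup := PySem.Dict.nodup_keys_ofList pi
  have hkeys' : (d.items.map (fun p => p.1)).Nodup := by simpa [PySem.Dict.keys] using hkeys
  -- decompose the items at the first 'dealer_button'
  have hex : ∃ y, d.items.find? (fun p => p.2 == "dealer_button") = some y := by
    obtain ⟨x, hx, hx2⟩ := hdeal
    exact Option.isSome_iff_exists.mp (List.find?_isSome.mpr ⟨x, hx, by simp [hx2]⟩)
  obtain ⟨q0, hq0⟩ := hex
  obtain ⟨hq0deal, P, S, hitems_eq, hP_f⟩ := List.find?_eq_some_iff_append.mp hq0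
  have hq0deal' : q0.2 = "dealer_button" := eq_of_beq hq0deal
  have hq0busy : pvBusy q0 = true := by simp [pvBusy, hq0deal']
  set bs := d.items.filter pvBusy with hbs
  set busy := bs.map (fun p => p.1) with hbusy
  set pre := P.filter pvBusy with hpreD
  set suf := S.filter pvBusy with hsufD
  have hbs_eq : bs = pre ++ q0 :: suf := by
    rw [hbs, hitems_eq, List.filter_append, List.filter_cons, if_pos hq0busy]
  have hpre_f : ∀ a ∈ pre, a.2 ≠ "dealer_button" := by
    intro a ha
    simpa using hP_f a (List.mem_of_mem_filter (hpreD ▸ ha))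
  set b0 := pre.length with hb0
  have hbusy_nd : busy.Nodup := by
    have h1 : List.Sublist busy (d.items.map (fun p => p.1)) := (List.filter_sublist).map _
    exact h1.nodup hkeys'
  have hbusy_eq : busy = pre.map (fun p => p.1) ++ q0.1 :: suf.map (fun p => p.1) := by
    rw [hbusy, hbs_eq]; simp
  have hq0bs : q0 ∈ bs := by rw [hbs_eq]; simp
  have hmem_items : ∀ y ∈ bs, y ∈ d.items := by
    intro y hy
    exact List.mem_of_mem_filter (hbs ▸ hy)
  have hnotpre : q0.1 ∉ pre.map (fun p => p.1) := by
    have hnd := hbusy_eq ▸ hbusy_nd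
    intro hmem
    exact (List.disjoint_of_nodup_append hnd) hmem List.mem_cons_self
  have hn6 : busy.length ≤ 6 := by
    rw [hbusy, hbs]
    simpa using hlen
  have hb0lt : b0 < busy.length := by
    rw [hbusy_eq]; simp only [List.length_append, List.length_map, List.length_cons, hb0]; omega
  have hn1 : 1 ≤ busy.length := by
    rw [hbusy_eq]; simp only [List.length_append, List.length_map, List.length_cons]; omega
  have hsubK : ∀ k ∈ busy, d.contains k = true := by
    intro k hk
    obtain ⟨y, hy, rfl⟩ := List.mem_map.mp (hbusy ▸ hk)
    exact (PySem.Dict.contains_iff_mem_keys d y.1).mpr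
      (PySem.Dict.mem_keys_of_mem_items d (hmem_items y hy))
  -- A's dealer-button scan returns q0.1
  have hAfilter : d.items.filter (fun p => p.2 == "dealer_button")
      = bs.filter (fun p => p.2 == "dealer_button") := by
    rw [hbs, List.filter_filter]
    apply List.filter_congr
    intro x _
    by_cases h : x.2 = "dealer_button"
    · simp [h, pvBusy]
    · simp [h]
  have hAscrut : PySem.List.pyGet?
      ((d.items.filter (fun p => p.2 == "dealer_button")).map (fun p => p.1)) 0 = some q0.1 := by
    have hpre0 : pre.filter (fun p => p.2 == "dealer_button") = [] := by
      apply List.filter_eq_nil_iff.mpr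
      intro a ha
      simp [hpre_f a ha]
    rw [hAfilter, hbs_eq, List.filter_append, hpre0]
    simp [hq0deal]
  have hidx : PySem.List.index? busy q0.1 = some b0 :=
    (PySem.List.index?_eq_some_iff busy q0.1 b0).mpr
      ⟨pre.map (fun p => p.1), suf.map (fun p => p.1), hbusy_eq, by simp [hb0], hnotpre⟩
  -- B's counting pass returns (|busy|, b0, true)
  have hNlen : busy.length = pre.length + 1 + suf.length := by
    rw [hbusy_eq]; simp; omega
  have hPcnt : (P.map (fun p => p.2)).countP (fun v => v != "-" && v != "-so-") = pre.length := by
    rw [List.countP_map, hpreD, ← List.countP_eq_length_filter]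
    exact List.countP_congr (fun a _ => Iff.rfl)
  have hScnt : (S.map (fun p => p.2)).countP (fun v => v != "-" && v != "-so-") = suf.length := by
    rw [List.countP_map, hsufD, ← List.countP_eq_length_filter]
    exact List.countP_congr (fun a _ => Iff.rfl)
  have hPnb : ∀ v ∈ P.map (fun p => p.2), v ≠ "dealer_button" := by
    intro v hv
    obtain ⟨a, ha, rfl⟩ := List.mem_map.mp hv
    simpa using hP_f a ha
  have hvals : d.values = P.map (fun p => p.2) ++ q0.2 :: S.map (fun p => p.2) := by
    show d.items.map (fun p => p.2) = _
    rw [hitems_eq]; simp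
  have hst : d.values.foldl (fun (st : Int × Option Int) v =>
        if v != "-" && v != "-so-" then
          (st.1 + 1, if v == "dealer_button" && st.2.isNone then some st.1 else st.2)
        else st) (0, none)
      = ((busy.length : Int), some (b0 : Int)) := by
    rw [hvals, List.foldl_append, pv_pass1_nb (P.map (fun p => p.2)) hPnb 0,
        hq0deal', pv_pass1_btn, hPcnt, hScnt, hNlen, hb0]
    simp only [Prod.mk.injEq, Option.some.injEq]
    constructor
    · push_cast; ring
    · ring
  set fB : Int → String := fun i =>
    labelOf (if i - (b0 : Int) < 0 then i - (b0 : Int) + (busy.length : Int) else i - (b0 : Int))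
      (busy.length : Int) with hfB
  have hstep1 : assign_positions_alt pi
      = (d.items.foldl (fun (a : PySem.Dict Int String × Int) kv =>
          if pvBusy kv = true then (a.1.insert kv.1 (fB a.2), a.2 + 1)
          else (a.1.insert kv.1 kv.2, a.2)) (PySem.Dict.empty, ((0 : Nat) : Int))).1.items := by
    simp only [assign_positions_alt]
    rw [← hd, hst]
    rfl
  have hfreshE : ∀ q ∈ d.items, (PySem.Dict.empty : PySem.Dict Int String).contains q.1 = false := by
    intro q _
    rfl
  have hBeq : assign_positions_alt pi = pvMapRank (fun j => fB ((j : Nat) : Int)) 0 d.items := by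
    rw [hstep1, pv_pass2 fB d.items PySem.Dict.empty 0 hfreshE hkeys']
    rfl
  -- resolve A's match and its rotation fold
  rw [hAscrut]
  simp only [hidx, Option.getD_some,
    PySem.List.slice_from_natCast, PySem.List.slice_to_natCast]
  set rot := busy.drop b0 ++ busy.take b0 with hrot
  have hperm : rot.Perm busy := by
    rw [hrot]
    exact (List.perm_append_comm).trans (by rw [List.take_append_drop])
  have hrot_nd : rot.Nodup := hperm.nodup_iff.mpr hbusy_nd
  have hsubR : ∀ k ∈ rot, d.contains k = true := fun k hk => hsubK k (hperm.mem_iff.mp hk)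
  set gA : Int → String := fun i =>
    if busy.length == 2 then (if i == 0 then "SB" else "BB")
    else ((PySem.List.pyGet? (exposOf busy.length) i).getD "") with hgA
  have hfunA : (fun (d2 : PySem.Dict Int String) (p : Int × Int) =>
        if busy.length == 2 then d2.insert p.2 (if p.1 == 0 then "SB" else "BB")
        else d2.insert p.2 ((PySem.List.pyGet? (exposOf busy.length) p.1).getD ""))
      = (fun (d2 : PySem.Dict Int String) (p : Int × Int) => d2.insert p.2 (gA p.1)) := by
    funext d2 p
    rw [hgA]
    by_cases h : (busy.length == 2) = true
    · simp [h]
    · simp [h]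
  rw [hfunA, pv_items_fold_enum gA rot d hrot_nd hsubR, hBeq]
  -- pointwise: rotation index = shifted busy index
  have hpoint : ∀ q ∈ d.items,
      (if q.1 ∈ rot then (q.1, gA (rot.idxOf q.1 : Int)) else q)
      = (if q.1 ∈ ((d.items.filter pvBusy).map (fun p => p.1))
          then (q.1, (fun i : Nat => gA (((if b0 ≤ i then i - b0 else i + busy.length - b0 : Nat)) : Int))
            (((d.items.filter pvBusy).map (fun p => p.1)).idxOf q.1)) else q) := by
    intro q _
    by_cases hmem : q.1 ∈ busy
    · have hmem' : q.1 ∈ rot := hperm.mem_iff.mpr hmem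
      rw [if_pos hmem', if_pos hmem]
      set i := List.idxOf q.1 busy with hi_def
      have hi : i < busy.length := List.idxOf_lt_length_of_mem hmem
      have hgetb : busy[i] = q.1 := List.getElem_idxOf hi
      set j := if b0 ≤ i then i - b0 else i + busy.length - b0 with hj_def
      have hj : j < busy.length := by rw [hj_def]; split <;> omega
      have hrotlen : rot.length = busy.length := by
        rw [hrot]; simp only [List.length_append, List.length_drop, List.length_take]; omega
      have hjr : j < rot.length := by omega
      have hrotget? : rot[j]? = some q.1 := by
        rw [hrot]
        by_cases hc : b0 ≤ i
        · have hj' : j = i - b0 := by rw [hj_def, if_pos hc]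
          rw [List.getElem?_append_left (by simp only [List.length_drop]; omega),
            List.getElem?_drop, show b0 + j = i from by omega,
            List.getElem?_eq_getElem hi, hgetb]
        · have hj' : j = i + busy.length - b0 := by rw [hj_def, if_neg hc]
          rw [List.getElem?_append_right (by simp only [List.length_drop]; omega),
            List.getElem?_take, List.length_drop,
            show j - (busy.length - b0) = i from by omega, if_pos (by omega),
            List.getElem?_eq_getElem hi, hgetb]
      have hrotget : rot[j]'hjr = q.1 := by
        have h2 := List.getElem?_eq_getElem hjr
        rw [hrotget?] at h2
        exact (Option.some.inj h2).symm
      have hrotidx : List.idxOf q.1 rot = j := by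
        rw [← hrotget]
        exact hrot_nd.idxOf_getElem j hjr
      rw [hrotidx]
    · rw [if_neg (fun h => hmem (hperm.mem_iff.mp h)), if_neg hmem]
  calc d.items.map (fun q => if q.1 ∈ rot then (q.1, gA (rot.idxOf q.1 : Int)) else q)
      = d.items.map (fun q => if q.1 ∈ ((d.items.filter pvBusy).map (fun p => p.1))
          then (q.1, (fun i : Nat => gA (((if b0 ≤ i then i - b0 else i + busy.length - b0 : Nat)) : Int))
            (((d.items.filter pvBusy).map (fun p => p.1)).idxOf q.1)) else q) :=
        List.map_congr_left hpoint
    _ = pvMapRank (fun i : Nat => gA (((if b0 ≤ i then i - b0 else i + busy.length - b0 : Nat)) : Int))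
          0 d.items := by
        have h := pv_map_eq_mapRank
          (fun i : Nat => gA (((if b0 ≤ i then i - b0 else i + busy.length - b0 : Nat)) : Int))
          d.items hkeys' d.items [] (by simp)
        simpa using h
    _ = pvMapRank (fun j => fB ((j : Nat) : Int)) 0 d.items := by
        apply pv_mapRank_congr
        intro j _ hjlt
        have hcnt : d.items.countP pvBusy = busy.length := by
          rw [hbusy, hbs, List.length_map, List.countP_eq_length_filter]
        rw [hcnt] at hjlt
        have hjN : j < busy.length := by omega
        have harg : (if (j : Int) - (b0 : Int) < 0
              then (j : Int) - (b0 : Int) + (busy.length : Int) else (j : Int) - (b0 : Int))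
            = (((if b0 ≤ j then j - b0 else j + busy.length - b0 : Nat)) : Int) := by
          by_cases hc : b0 ≤ j
          · rw [if_pos hc, if_neg (by omega : ¬ ((j : Int) - (b0 : Int) < 0))]
            omega
          · rw [if_neg hc, if_pos (by omega : (j : Int) - (b0 : Int) < 0)]
            omega
        rw [hfB]
        show gA _ = labelOf _ _
        rw [harg, hgA]
        have hsj : (if b0 ≤ j then j - b0 else j + busy.length - b0) < busy.length := by
          split <;> omega
        exact pv_value_eq busy.length _ hn1 hn6 hsj
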